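-- pv_equiv track=rewrite | github.com/brnomendes/grader-edx | Core/Parser.py | parse
-- ===== SOURCE A (Python) =====
-- def parse(student_response):
--     program = ""
--     test = ""
--     lines = student_response.splitlines(True)
--
--     in_test = False
--     for line in lines:
--         if line.startswith("def test_"):
--             in_test = True
--         elif in_test and not line.startswith((" ", "\t")):
--             in_test = False
--
--         if in_test:
--             test = test + line
--         else:
--             program = program + line
--
--     return program, test
-- ===== SOURCE B (Python) =====
-- def parse(student_response):
--     # Two-phase: cut the lines into consecutive top-level blocks, then join by block type.
--     blocks = []          # finished blocks: (is_test, [lines])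
--     cur = None           # current open block
--     for line in student_response.splitlines(True):
--         if cur is not None and line.startswith((" ", "\t")):
--             cur[1].append(line)
--         else:
--             if cur is not None:
--                 blocks.append(cur)
--             cur = (line.startswith("def test_"), [line])
--     if cur is not None:
--         blocks.append(cur)
--     program = "".join(l for is_test, ls in blocks if not is_test for l in ls)
--     test = "".join(l for is_test, ls in blocks if is_test for l in ls)
--     return program, test
-- ===== Notes on version B (the rewrite author's own statement) =====
-- stated objective: alternative
-- what changed: B replaces A's running in_test flag that tags each line on the fly with a two-phase decomposition: it first cuts the lines into consecutive top-level blocks (a block opens at every non-indented line, typed by whether its header starts with 'def test_'), then joins the blocks by type into the two output strings.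
import Mathlib
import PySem

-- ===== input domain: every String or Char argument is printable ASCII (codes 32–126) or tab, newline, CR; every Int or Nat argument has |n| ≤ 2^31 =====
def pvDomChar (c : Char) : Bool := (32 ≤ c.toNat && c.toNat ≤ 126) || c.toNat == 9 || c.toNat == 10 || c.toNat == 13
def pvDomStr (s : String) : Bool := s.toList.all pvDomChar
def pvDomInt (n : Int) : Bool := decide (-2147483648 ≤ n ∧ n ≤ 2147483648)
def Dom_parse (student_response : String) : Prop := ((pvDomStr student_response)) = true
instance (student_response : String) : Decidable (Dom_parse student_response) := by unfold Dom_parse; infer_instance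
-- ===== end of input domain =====

-- B re-groups the lines into top-level blocks first and joins them by block type (different decomposition, same cost); A classifies line by line with a running flag.

-- shared helper: str.splitlines(True) (keepends). Hand-ported; exact on Dom_parse
-- (printable ASCII + tab/newline/CR), where the only line boundaries are \n, \r\n, \r.
def pvSplitKeep (cur : List Char) : List Char → List (List Char)
  | [] => if cur.isEmpty then [] else [cur.reverse]
  | '\r' :: '\n' :: rest => (cur.reverse ++ ['\r', '\n']) :: pvSplitKeep [] rest
  | c :: rest =>
    if c = '\n' ∨ c = '\r' then (cur.reverse ++ [c]) :: pvSplitKeep [] rest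
    else pvSplitKeep (c :: cur) rest

-- line.startswith((" ", "\t"))
def pvIndented (line : List Char) : Bool :=
  PySem.Chars.startswith line [' '] || PySem.Chars.startswith line ['\t']

-- line.startswith("def test_")
def pvIsTestHeader (line : List Char) : Bool :=
  PySem.Chars.startswith line ("def test_".toList)

-- ===== PORT A =====
-- loop body of A: state (program, test, in_test)
def pvStepA (st : List Char × List Char × Bool) (line : List Char) :
    List Char × List Char × Bool :=
  let in_test := if pvIsTestHeader line then true
                 else if st.2.2 && !pvIndented line then false
                 else st.2.2
  if in_test then (st.1, st.2.1 ++ line, in_test) else (st.1 ++ line, st.2.1, in_test)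

def parse (student_response : String) : String × String :=
  let lines := pvSplitKeep [] student_response.toList
  let res := lines.foldl pvStepA ([], [], false)
  (String.ofList res.1, String.ofList res.2.1)

-- ===== PORT B =====
-- loop body of B: state (finished blocks, current open block)
def pvStepB (st : List (Bool × List (List Char)) × Option (Bool × List (List Char)))
    (line : List Char) : List (Bool × List (List Char)) × Option (Bool × List (List Char)) :=
  match st with
  | (blocks, some cur) =>
    if pvIndented line then (blocks, some (cur.1, cur.2 ++ [line]))
    else (blocks ++ [cur], some (pvIsTestHeader line, [line]))
  | (blocks, none) => (blocks, some (pvIsTestHeader line, [line]))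

-- final 'if cur is not None: blocks.append(cur)'
def pvClose (st : List (Bool × List (List Char)) × Option (Bool × List (List Char))) :
    List (Bool × List (List Char)) :=
  match st.2 with
  | some cur => st.1 ++ [cur]
  | none => st.1

-- the two joins over the block list
def pvProgOf (bs : List (Bool × List (List Char))) : List Char :=
  ((bs.filter (fun b => !b.1)).flatMap (fun b => b.2)).flatten
def pvTestOf (bs : List (Bool × List (List Char))) : List Char :=
  ((bs.filter (fun b => b.1)).flatMap (fun b => b.2)).flatten

def parse_alt (student_response : String) : String × String :=
  let st := (pvSplitKeep [] student_response.toList).foldl pvStepB ([], none)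
  let blocks := pvClose st
  (String.ofList (pvProgOf blocks), String.ofList (pvTestOf blocks))

-- ===== PRECONDITION & SPEC =====
def Spec_parse (student_response : String) (out : String × String) : Prop := out = parse_alt student_response
instance (student_response : String) (out : String × String) : Decidable (Spec_parse student_response out) := by unfold Spec_parse; infer_instance

-- ===== CLAIM (what is proved, stated in full; the proofs are below) =====
def Claim_equal_parse : Prop := ∀ (student_response : String), Dom_parse student_response → Spec_parse student_response (parse student_response)

-- ===== LEMMAS AND PROOFS =====

def pvFlag (cur : Option (Bool × List (List Char))) : Bool :=
  match cur with | some c => c.1 | none => false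

theorem pvHeader_not_indented (line : List Char) (h : pvIsTestHeader line = true) :
    pvIndented line = false := by
  unfold pvIsTestHeader at h
  rw [PySem.Chars.startswith_iff] at h
  obtain ⟨t, ht⟩ := h
  subst ht
  unfold pvIndented
  have h1 : PySem.Chars.startswith ('d' :: 'e' :: 'f' :: ' ' :: 't' :: 'e' :: 's' :: 't' :: '_' :: t) [' '] = false := by
    rw [← Bool.not_eq_true, PySem.Chars.startswith_iff]
    rintro ⟨u, hu⟩
    injection hu with h _
    exact absurd h (by decide)
  have h2 : PySem.Chars.startswith ('d' :: 'e' :: 'f' :: ' ' :: 't' :: 'e' :: 's' :: 't' :: '_' :: t) ['\t'] = false := by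
    rw [← Bool.not_eq_true, PySem.Chars.startswith_iff]
    rintro ⟨u, hu⟩
    injection hu with h _
    exact absurd h (by decide)
  simp [h1, h2]

-- one loop step preserves the correspondence between A's state and B's state
theorem pvStep_corr (blocks : List (Bool × List (List Char)))
    (cur : Option (Bool × List (List Char))) (line : List Char) :
    pvStepA (pvProgOf (pvClose (blocks, cur)), pvTestOf (pvClose (blocks, cur)), pvFlag cur) line
      = (pvProgOf (pvClose (pvStepB (blocks, cur) line)),
         pvTestOf (pvClose (pvStepB (blocks, cur) line)),
         pvFlag (pvStepB (blocks, cur) line).2) := by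
  cases cur with
  | none =>
    by_cases ht : pvIsTestHeader line = true
    · simp [pvStepA, pvStepB, pvClose, pvFlag, ht, pvProgOf, pvTestOf, List.filter_append]
    · simp at ht
      simp [pvStepA, pvStepB, pvClose, pvFlag, ht, pvProgOf, pvTestOf, List.filter_append]
  | some c =>
    by_cases ht : pvIsTestHeader line = true
    · have hi := pvHeader_not_indented line ht
      cases hc : c.1 <;>
        simp [pvStepA, pvStepB, pvClose, pvFlag, ht, hi, hc,
          pvProgOf, pvTestOf, List.filter_append, List.append_assoc]
    · simp at ht
      by_cases hi : pvIndented line = true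
      · cases hc : c.1 <;>
          simp [pvStepA, pvStepB, pvClose, pvFlag, ht, hi, hc,
            pvProgOf, pvTestOf, List.filter_append, List.append_assoc]
      · simp at hi
        cases hc : c.1 <;>
          simp [pvStepA, pvStepB, pvClose, pvFlag, ht, hi, hc,
            pvProgOf, pvTestOf, List.filter_append, List.append_assoc]

theorem pvFold_corr (lines : List (List Char)) :
    ∀ (blocks : List (Bool × List (List Char))) (cur : Option (Bool × List (List Char))),
    lines.foldl pvStepA (pvProgOf (pvClose (blocks, cur)), pvTestOf (pvClose (blocks, cur)), pvFlag cur)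
      = (pvProgOf (pvClose (lines.foldl pvStepB (blocks, cur))),
         pvTestOf (pvClose (lines.foldl pvStepB (blocks, cur))),
         pvFlag (lines.foldl pvStepB (blocks, cur)).2) := by
  induction lines with
  | nil => intro blocks cur; rfl
  | cons line rest ih =>
    intro blocks cur
    rw [List.foldl_cons, List.foldl_cons, pvStep_corr]
    have := ih (pvStepB (blocks, cur) line).1 (pvStepB (blocks, cur) line).2
    simpa using this

-- ===== VERDICT (by name: the statement is the Claim_ definition above) =====
theorem parse_spec : Claim_equal_parse := by
  intro s _
  simp only [Spec_parse, parse, parse_alt]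
  have h := pvFold_corr (pvSplitKeep [] s.toList) [] none
  rw [show pvProgOf (pvClose ([], none)) = [] from rfl,
      show pvTestOf (pvClose ([], none)) = [] from rfl,
      show pvFlag none = false from rfl] at h
  rw [h]
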